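-- pv_equiv track=rewrite | github.com/furukawa1020/Memory-Safe-English-App | services/worker/training/public_corpora.py | _infer_text_difficulty
-- ===== SOURCE A (Python) =====
-- def _infer_text_difficulty(text: str) -> str:
--     words = len([part for part in text.split() if part.strip()])
--     if words < 60:
--         return "foundation"
--     if words < 120:
--         return "intermediate"
--     if words < 220:
--         return "upper_intermediate"
--     return "advanced"
-- ===== SOURCE B (Python) =====
-- def _bisect_right(boundaries, x):
--     lo, hi = 0, len(boundaries)
--     while lo < hi:
--         mid = (lo + hi) // 2
--         if x < boundaries[mid]:
--             hi = mid
--         else: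
--             lo = mid + 1
--     return lo
--
--
-- def _infer_text_difficulty(text: str) -> str:
--     boundaries = [60, 120, 220]
--     labels = ["foundation", "intermediate", "upper_intermediate", "advanced"]
--     words = len(text.split())
--     return labels[_bisect_right(boundaries, words)]
-- ===== Notes on version B (the rewrite author's own statement) =====
-- stated objective: alternative
-- what changed: Replaced the filtered comprehension plus if-cascade by a plain len(text.split()) word count (split() never yields whitespace-only tokens, so the filter is redundant) and a threshold-table lookup via a hand-written bisect_right binary search instead of sequential comparisons.
import Mathlib
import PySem

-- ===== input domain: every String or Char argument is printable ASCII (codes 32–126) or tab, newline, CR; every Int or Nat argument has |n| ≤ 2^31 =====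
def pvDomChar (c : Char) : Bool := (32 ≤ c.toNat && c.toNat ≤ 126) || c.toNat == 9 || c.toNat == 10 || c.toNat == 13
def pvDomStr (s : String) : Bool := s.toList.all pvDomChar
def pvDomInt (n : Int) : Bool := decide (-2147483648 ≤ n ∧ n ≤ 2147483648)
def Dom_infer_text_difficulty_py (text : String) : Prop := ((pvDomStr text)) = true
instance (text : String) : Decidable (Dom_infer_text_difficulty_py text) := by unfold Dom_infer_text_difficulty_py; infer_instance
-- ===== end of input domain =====

-- B replaces A's filtered comprehension + if-cascade by len(text.split()) and a
-- threshold table consulted via binary search (bisect_right); same values everywhere.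

-- ===== PORT A =====
def infer_text_difficulty_py (text : String) : String :=
  let words := ((PySem.Str.split₀ text).filter
      (fun part => !(PySem.Str.strip part).isEmpty)).length
  if words < 60 then "foundation"
  else if words < 120 then "intermediate"
  else if words < 220 then "upper_intermediate"
  else "advanced"

-- ===== PORT B =====
-- binary search, transliteration of Source B's _bisect_right
-- (while loop → structural recursion on a fuel that bounds hi - lo; fuel only makes it total)
def pvBisectRightGo (boundaries : List Nat) (x : Nat) : Nat → Nat → Nat → Nat
  | 0, lo, _ => lo
  | fuel + 1, lo, hi =>
    if lo < hi then
      let mid := (lo + hi) / 2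
      if x < boundaries.getD mid 0 then pvBisectRightGo boundaries x fuel lo mid
      else pvBisectRightGo boundaries x fuel (mid + 1) hi
    else lo

def pvBisectRight (boundaries : List Nat) (x : Nat) (lo hi : Nat) : Nat :=
  pvBisectRightGo boundaries x (hi - lo) lo hi

def infer_text_difficulty_py_alt (text : String) : String :=
  let boundaries : List Nat := [60, 120, 220]
  let labels := ["foundation", "intermediate", "upper_intermediate", "advanced"]
  let words := (PySem.Str.split₀ text).length
  labels.getD (pvBisectRight boundaries words 0 boundaries.length) ""

-- ===== PRECONDITION & SPEC =====
def Spec_infer_text_difficulty_py (text : String) (out : String) : Prop := out = infer_text_difficulty_py_alt text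
instance (text : String) (out : String) : Decidable (Spec_infer_text_difficulty_py text out) := by unfold Spec_infer_text_difficulty_py; infer_instance

-- ===== CLAIM (what is proved, stated in full; the proofs are below) =====
def Claim_equal_infer_text_difficulty_py : Prop := ∀ (text : String), Dom_infer_text_difficulty_py text → Spec_infer_text_difficulty_py text (infer_text_difficulty_py text)

-- ===== LEMMAS AND PROOFS =====

-- every token produced by split₀.go is nonempty and contains no whitespace
lemma split₀_go_tokens (s : List Char) : ∀ (cur : List Char) (acc : List (List Char)),
    (∀ c ∈ cur, PySem.Chars.isspace c = false) →
    (∀ t ∈ acc, t ≠ [] ∧ ∀ c ∈ t, PySem.Chars.isspace c = false) →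
    ∀ t ∈ PySem.Chars.split₀.go s cur acc, t ≠ [] ∧ ∀ c ∈ t, PySem.Chars.isspace c = false := by
  induction s with
  | nil =>
    intro cur acc hcur hacc t ht
    simp only [PySem.Chars.split₀.go] at ht
    by_cases h : cur.isEmpty
    · simp [h] at ht
      exact hacc t ht
    · simp [h] at ht
      rcases ht with h1 | rfl
      · exact hacc t h1
      · constructor
        · simpa [List.isEmpty_iff] using h
        · intro c hc
          exact hcur c (List.mem_reverse.mp hc)
  | cons c rest ih =>
    intro cur acc hcur hacc t ht
    simp only [PySem.Chars.split₀.go] at ht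
    by_cases hsp : PySem.Chars.isspace c
    · by_cases h : cur.isEmpty
      · simp [hsp, h] at ht
        exact ih [] acc (by simp) hacc t ht
      · simp [hsp, h] at ht
        refine ih [] (cur.reverse :: acc) (by simp) ?_ t ht
        intro u hu
        rcases List.mem_cons.mp hu with rfl | hu
        · exact ⟨by simpa [List.isEmpty_iff] using h,
            fun d hd => hcur d (List.mem_reverse.mp hd)⟩
        · exact hacc u hu
    · simp [hsp] at ht
      refine ih (c :: cur) acc ?_ hacc t ht
      intro d hd
      rcases List.mem_cons.mp hd with rfl | hd
      · simpa using hsp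
      · exact hcur d hd
  
lemma split₀_tokens (s : List Char) :
    ∀ t ∈ PySem.Chars.split₀ s, t ≠ [] ∧ ∀ c ∈ t, PySem.Chars.isspace c = false := by
  intro t ht
  exact split₀_go_tokens s [] [] (by simp) (by simp) t ht

lemma strip_of_no_space (t : List Char) (h : ∀ c ∈ t, PySem.Chars.isspace c = false) :
    PySem.Chars.strip t = t := by
  have h1 : List.dropWhile PySem.Chars.isspace t = t :=
    List.dropWhile_eq_self_iff.mpr (fun hl => by
      simp only [Bool.not_eq_true]; exact h _ (List.getElem_mem hl))
  have h2 : List.dropWhile PySem.Chars.isspace t.reverse = t.reverse :=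
    List.dropWhile_eq_self_iff.mpr (fun hl => by
      simp only [Bool.not_eq_true]; exact h _ (List.mem_reverse.mp (List.getElem_mem hl)))
  simp [PySem.Chars.strip, PySem.Chars.lstrip, PySem.Chars.rstrip, h1, h2]

lemma filter_split₀ (text : String) :
    (PySem.Str.split₀ text).filter (fun part => !(PySem.Str.strip part).isEmpty)
      = PySem.Str.split₀ text := by
  apply List.filter_eq_self.mpr
  intro part hpart
  simp only [PySem.Str.split₀, List.mem_map] at hpart
  obtain ⟨t, ht, rfl⟩ := hpart
  obtain ⟨hne, hns⟩ := split₀_tokens text.toList t ht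
  simp only [PySem.Str.strip]
  have ht2 : (String.ofList t).toList = t := by simp
  rw [ht2, strip_of_no_space t hns]
  simp only [Bool.not_eq_eq_eq_not, Bool.not_true, Bool.eq_false_iff, ne_eq,
    String.isEmpty_iff]
  intro h
  apply hne
  rw [← ht2, h]
  rfl

lemma bisect_eval (n : Nat) :
    pvBisectRight [60, 120, 220] n 0 3 =
      if n < 60 then 0 else if n < 120 then 1 else if n < 220 then 2 else 3 := by
  by_cases h1 : n < 60 <;> by_cases h2 : n < 120 <;> by_cases h3 : n < 220 <;>
    first
      | omega
      | simp [pvBisectRight, pvBisectRightGo, h1, h2, h3]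

-- ===== VERDICT (by name: the statement is the Claim_ definition above) =====
theorem infer_text_difficulty_py_spec : Claim_equal_infer_text_difficulty_py := by
  intro text _
  unfold Spec_infer_text_difficulty_py infer_text_difficulty_py infer_text_difficulty_py_alt
  rw [filter_split₀]
  simp only [List.length_cons, List.length_nil]
  rw [bisect_eval]
  split_ifs <;> rfl
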